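-- pv_equiv track=rewrite | github.com/SilentJunior/codedex-courseNull | 11-ejerciciosBloque2/ej1.py | recorrerls
-- ===== SOURCE A (Python) =====
-- def recorrerls(lista=None):
--     """ Recorre una lista y retorna string """
--     if lista is None:
--         lista = []
--     longls = len(lista)
--     strcon = ""
--     for look in lista:
--         if lista.index(look) != (longls-1):
--             strcon += f"{look}, "
--         else:
--             strcon += f"{look}\n"
--     return strcon
-- ===== SOURCE B (Python) =====
-- def recorrerls(lista=None):
--     """ Recorre una lista y retorna string """
--     if not lista:
--         return ""
--     *init, last = lista
--     return "".join(f"{x}, " for x in init) + f"{last}\n"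
-- ===== Notes on version B (the rewrite author's own statement) =====
-- stated objective: simpler
-- what changed: Instead of A's per-element list.index scan inside the loop, B splits the list once into init and last, joins a uniform "x, " over init and appends "last\n".
-- intended difference: On lists whose last element also occurs earlier, A's list.index never equals the last position, so A ends the string with "last, " and no newline; B ends with "last\n", which is the intended 'special last element' behaviour. — e.g. on recorrerls([1, 1]): A returns "1, 1, ", B returns "1, 1\n"
import Mathlib
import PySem

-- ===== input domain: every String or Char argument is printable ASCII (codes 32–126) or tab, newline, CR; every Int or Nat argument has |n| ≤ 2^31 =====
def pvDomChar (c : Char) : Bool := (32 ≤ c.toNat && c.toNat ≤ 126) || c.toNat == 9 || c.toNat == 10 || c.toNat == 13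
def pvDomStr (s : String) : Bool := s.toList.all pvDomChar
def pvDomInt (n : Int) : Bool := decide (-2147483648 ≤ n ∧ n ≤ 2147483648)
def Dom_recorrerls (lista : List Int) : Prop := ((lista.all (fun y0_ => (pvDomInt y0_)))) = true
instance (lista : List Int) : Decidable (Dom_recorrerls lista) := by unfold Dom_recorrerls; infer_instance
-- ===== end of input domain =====

-- B replaces A's per-element list.index scan by one init/last split, a uniform join over init
-- and an appended "last\n" (objective: simpler); on lists whose last element occurs earlier
-- the two values differ (see D_recorrerls below).

-- ===== PORT A =====
def recorrerls (lista : List Int) : String :=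
  let longls : Int := lista.length
  lista.foldl (fun strcon look =>
    if (PySem.List.index? lista look).map (fun i => (i : Int)) ≠ some (longls - 1)
    then strcon ++ (PySem.Int.toStr look ++ ", ")
    else strcon ++ (PySem.Int.toStr look ++ "\n")) ""

-- ===== PORT B =====
def recorrerls_alt (lista : List Int) : String :=
  if h : lista = [] then ""
  else
    PySem.Str.join "" (lista.dropLast.map (fun x => PySem.Int.toStr x ++ ", "))
      ++ (PySem.Int.toStr (lista.getLast h) ++ "\n")

-- ===== PRECONDITION & SPEC =====
-- On lists whose last element also occurs earlier, A's list.index (first occurrence) never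
-- equals the last position, so A ends the string with "last, " and no newline; B ends with
-- "last\n", which is the intended 'special last element' behaviour.
def D_recorrerls (lista : List Int) : Prop :=
  (lista.getLast?.any (fun x => lista.dropLast.contains x)) = true
instance (lista : List Int) : Decidable (D_recorrerls lista) := by unfold D_recorrerls; infer_instance

def Spec_recorrerls (lista : List Int) (out : String) : Prop := ¬ D_recorrerls lista → out = recorrerls_alt lista
instance (lista : List Int) (out : String) : Decidable (Spec_recorrerls lista out) := by unfold Spec_recorrerls; infer_instance

def pvDiffWitness_recorrerls : List Int := [1, 1]
def pvDiffWitnessOut_recorrerls : String × String := ("1, 1, ", "1, 1\n")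

-- ===== CLAIM (what is proved, stated in full; the proofs are below) =====
def Claim_unchanged_recorrerls : Prop := ∀ (lista : List Int), Dom_recorrerls lista → Spec_recorrerls lista (recorrerls lista)
def Claim_changed_recorrerls : Prop := Dom_recorrerls (pvDiffWitness_recorrerls) ∧ D_recorrerls (pvDiffWitness_recorrerls) ∧ recorrerls (pvDiffWitness_recorrerls) = pvDiffWitnessOut_recorrerls.1 ∧ recorrerls_alt (pvDiffWitness_recorrerls) = pvDiffWitnessOut_recorrerls.2 ∧ pvDiffWitnessOut_recorrerls.1 ≠ pvDiffWitnessOut_recorrerls.2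
def Claim_exact_recorrerls : Prop := ∀ (lista : List Int), Dom_recorrerls lista → D_recorrerls lista → recorrerls lista ≠ recorrerls_alt lista

-- ===== LEMMAS AND PROOFS =====

-- A's accumulating loop, read at the List Char level
lemma pv_foldlA_toList {α : Type} (l : List α) (c : α → Prop) [DecidablePred c]
    (f g : α → String) (a : String) :
    (l.foldl (fun s x => if c x then s ++ f x else s ++ g x) a).toList
      = a.toList ++ (l.map (fun x => if c x then (f x).toList else (g x).toList)).flatten := by
  induction l generalizing a with
  | nil => simp
  | cons x xs ih =>
    simp only [List.foldl_cons, List.map_cons, List.flatten_cons, ih]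
    split_ifs <;> simp

lemma pv_join_empty (ls : List (List Char)) : PySem.Chars.join [] ls = ls.flatten := by
  induction ls with
  | nil => simp
  | cons a l ih =>
    cases l with
    | nil => simp
    | cons b m =>
      rw [PySem.Chars.join_cons_cons]
      simp_all

-- A's loop condition, characterised: the first occurrence of x sits at the last index
-- iff x IS the last element and the last element does not occur earlier.
lemma pv_cond_iff (lista : List Int) (h : lista ≠ []) (x : Int) (hx : x ∈ lista) :
    ((PySem.List.index? lista x).map (fun i => (i : Int)) = some ((lista.length : Int) - 1))
      ↔ (x = lista.getLast h ∧ lista.getLast h ∉ lista.dropLast) := by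
  have hn : 1 ≤ lista.length := List.length_pos_iff.mpr h
  constructor
  · intro hc
    cases hq : PySem.List.index? lista x with
    | none => rw [hq] at hc; simp at hc
    | some k =>
      rw [hq] at hc
      simp at hc
      have hk1 : k = lista.length - 1 := by omega
      subst hk1
      obtain ⟨hlt, hget, hprev⟩ := PySem.List.getElem_of_index?_eq_some hq
      have hlast : lista.getLast h = x := by
        rw [List.getLast_eq_getElem]; exact hget
      refine ⟨hlast.symm, ?_⟩
      intro hmem
      obtain ⟨j, hj, hjx⟩ := List.mem_iff_getElem.mp hmem
      have hjlt : j < lista.length - 1 := by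
        have := lista.length_dropLast; omega
      refine hprev j hjlt ?_
      have h2 : lista[j]'(by omega) = lista.getLast h := by
        rw [← List.getElem_dropLast]; exact hjx
      exact h2.trans hlast
  · rintro ⟨rfl, hnm⟩
    have hsplit : lista.dropLast ++ [lista.getLast h] = lista := List.dropLast_append_getLast h
    have hidx := PySem.List.index?_append_singleton_self (l := lista.dropLast)
      (c := lista.getLast h) hnm
    rw [hsplit] at hidx
    rw [hidx]
    simp
    have := lista.length_dropLast
    omega

-- B's toList, closed form
lemma pv_alt_toList (lista : List Int) (h : lista ≠ []) :
    (recorrerls_alt lista).toList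
      = (lista.dropLast.map (fun x => (PySem.Int.toStr x ++ ", ").toList)).flatten
        ++ (PySem.Int.toStr (lista.getLast h) ++ "\n").toList := by
  unfold recorrerls_alt
  rw [dif_neg h]
  rw [String.toList_append, PySem.Str.toList_join]
  have he : ("".toList : List Char) = ([] : List Char) := rfl
  rw [he, pv_join_empty]
  simp [List.map_map, Function.comp_def, PySem.Int.toStr]

-- ===== VERDICT (by name: the statement is the Claim_ definition above) =====
theorem recorrerls_spec : Claim_unchanged_recorrerls := by
  intro lista _ hnd
  by_cases h : lista = []
  · subst h; rfl
  · have hm : lista.getLast h ∉ lista.dropLast := by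
      intro hmem
      apply hnd
      unfold D_recorrerls
      rw [List.getLast?_eq_some_getLast h]
      simpa using hmem
    refine String.toList_inj.mp ?_
    rw [pv_alt_toList lista h]
    unfold recorrerls
    simp only
    rw [pv_foldlA_toList lista
      (fun look => (PySem.List.index? lista look).map (fun i => (i : Int)) ≠ some ((lista.length : Int) - 1))]
    have he : ("".toList : List Char) = ([] : List Char) := rfl
    rw [he, List.nil_append]
    have hsplit : lista.dropLast ++ [lista.getLast h] = lista := List.dropLast_append_getLast h
    have hmaps : (lista.dropLast ++ [lista.getLast h]).map
        (fun x => if (PySem.List.index? lista x).map (fun i => (i : Int)) ≠ some ((lista.length : Int) - 1)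
                  then (PySem.Int.toStr x ++ ", ").toList else (PySem.Int.toStr x ++ "\n").toList)
        = lista.map
        (fun x => if (PySem.List.index? lista x).map (fun i => (i : Int)) ≠ some ((lista.length : Int) - 1)
                  then (PySem.Int.toStr x ++ ", ").toList else (PySem.Int.toStr x ++ "\n").toList) := by
      rw [hsplit]
    rw [← hmaps]
    simp only [List.map_append, List.map_cons, List.map_nil, List.flatten_append]
    congr 1
    · congr 1
      refine List.map_congr_left ?_
      intro x hxi
      have hnc : ¬ ((PySem.List.index? lista x).map (fun i => (i : Int)) = some ((lista.length : Int) - 1)) := by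
        intro hcx
        exact hm (((pv_cond_iff lista h x (List.dropLast_subset lista hxi)).mp hcx).1 ▸ hxi)
      rw [if_pos hnc]
    · have hc : (PySem.List.index? lista (lista.getLast h)).map (fun i => (i : Int)) = some ((lista.length : Int) - 1) :=
        (pv_cond_iff lista h _ (lista.getLast_mem h)).mpr ⟨rfl, hm⟩
      rw [if_neg (not_not_intro hc)]
      simp

theorem recorrerls_changed : Claim_changed_recorrerls := by unfold Claim_changed_recorrerls; decide

theorem recorrerls_tight : Claim_exact_recorrerls := by
  intro lista _ hd
  unfold D_recorrerls at hd
  have h : lista ≠ [] := by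
    intro he; subst he; simp at hd
  have hm : lista.getLast h ∈ lista.dropLast := by
    rw [List.getLast?_eq_some_getLast h] at hd
    simpa using hd
  intro heq
  have htl := congrArg String.toList heq
  rw [pv_alt_toList lista h] at htl
  unfold recorrerls at htl
  simp only at htl
  rw [pv_foldlA_toList lista
    (fun look => (PySem.List.index? lista look).map (fun i => (i : Int)) ≠ some ((lista.length : Int) - 1))] at htl
  have he : ("".toList : List Char) = ([] : List Char) := rfl
  rw [he, List.nil_append] at htl
  -- inside D_, every element takes the comma branch in A
  have hall : lista.map
      (fun x => if (PySem.List.index? lista x).map (fun i => (i : Int)) ≠ some ((lista.length : Int) - 1)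
                then (PySem.Int.toStr x ++ ", ").toList else (PySem.Int.toStr x ++ "\n").toList)
      = lista.map (fun x => (PySem.Int.toStr x ++ ", ").toList) := by
    refine List.map_congr_left ?_
    intro x hx
    have hnc : ¬ ((PySem.List.index? lista x).map (fun i => (i : Int)) = some ((lista.length : Int) - 1)) := by
      intro hcx
      exact ((pv_cond_iff lista h x hx).mp hcx).2 hm
    rw [if_pos hnc]
  rw [hall] at htl
  -- compare lengths: A's string is exactly one character longer than B's
  have hlen := congrArg List.length htl
  have hsplit : lista.dropLast ++ [lista.getLast h] = lista := List.dropLast_append_getLast h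
  conv_lhs at hlen => rw [← hsplit]
  simp [List.length_append] at hlen
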